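-- pv_equiv track=rewrite | github.com/Furina-star/League-of-Legends-Analyst-Discord-bot | utils/parsers.py | find_duos
-- ===== SOURCE A (Python) =====
-- def find_duos(player_histories: list) -> set:
--     duos = set()
--     # Compare every player's match history against every other player's history
--     for i in range(len(player_histories)):
--         for j in range(i + 1, len(player_histories)):
--             p1_id, p1_matches = player_histories[i]
--             p2_id, p2_matches = player_histories[j]
--
--             # If the lists intersect (share a Match ID), they're playing together lol
--             if p1_matches and p2_matches:
--                 shared_games = set(p1_matches).intersection(p2_matches)
--
--                 if len(shared_games) >= 2:  # If they have 2 or more shared games in their recent history, they're probably duos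
--                     duos.add(p1_id)
--                     duos.add(p2_id)
--     return duos
-- ===== SOURCE B (Python) =====
-- def find_duos(player_histories: list) -> set:
--     # Inverted index: match id -> ascending list of indices of players whose history contains it
--     index = {}
--     for i, (_, matches) in enumerate(player_histories):
--         for m in dict.fromkeys(matches):
--             index.setdefault(m, []).append(i)
--     ids = []
--     for i, (pid, matches) in enumerate(player_histories):
--         # count distinct shared matches with each later player that co-occurs with i
--         cnt = {}
--         for m in dict.fromkeys(matches):
--             for j in index[m]:
--                 if j > i:
--                     cnt[j] = cnt.get(j, 0) + 1
--         for j in sorted(cnt):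
--             if cnt[j] >= 2:
--                 ids.append(pid)
--                 ids.append(player_histories[j][0])
--     return set(ids)
-- ===== Notes on version B (the rewrite author's own statement) =====
-- stated objective: faster
-- what changed: Replaces A's all-pairs comparison with per-pair set intersection by an inverted index match_id->player indices, counting distinct shared matches only for pairs that actually co-occur in some match and emitting each player's qualifying partners in sorted order.
import Mathlib
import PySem

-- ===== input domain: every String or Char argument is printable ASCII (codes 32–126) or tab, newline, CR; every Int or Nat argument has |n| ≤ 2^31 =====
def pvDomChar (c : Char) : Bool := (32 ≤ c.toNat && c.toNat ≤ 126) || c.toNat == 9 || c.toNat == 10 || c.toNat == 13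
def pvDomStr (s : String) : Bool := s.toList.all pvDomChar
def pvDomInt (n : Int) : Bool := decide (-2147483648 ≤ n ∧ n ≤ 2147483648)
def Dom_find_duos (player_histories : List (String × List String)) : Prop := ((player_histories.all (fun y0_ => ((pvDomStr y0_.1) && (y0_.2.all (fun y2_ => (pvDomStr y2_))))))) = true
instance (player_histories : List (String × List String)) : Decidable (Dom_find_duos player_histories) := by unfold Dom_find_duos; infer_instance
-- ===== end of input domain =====

-- B replaces A's all-pairs history intersection with an inverted index match_id → player indices,
-- counting co-occurrences only for pairs that actually share a match (objective: faster, asymptotic).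
-- Both Pythons return a set; the ports return its elements in insertion order and agree as lists.

-- ===== PORT A =====
def find_duos (player_histories : List (String × List String)) : List String :=
  (PySem.List.pyRange 0 player_histories.length 1).foldl (fun duos i =>
    (PySem.List.pyRange (i + 1) player_histories.length 1).foldl (fun duos j =>
      let p1 := PySem.List.pyGetD player_histories i ("", [])
      let p2 := PySem.List.pyGetD player_histories j ("", [])
      if p1.2 ≠ [] ∧ p2.2 ≠ [] then
        let shared := PySem.Set.inter (PySem.Set.ofList p1.2) p2.2
        if 2 ≤ PySem.Set.len shared then
          PySem.Set.add (PySem.Set.add duos p1.1) p2.1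
        else duos
      else duos) duos) PySem.Set.empty

-- ===== PORT B =====
-- inverted index: match id → ascending list of indices of players whose history contains it
def pvBuildIndex (player_histories : List (String × List String)) : PySem.Dict String (List Int) :=
  (PySem.List.enumerate player_histories).foldl (fun d p =>
    (PySem.List.dedup p.2.2).foldl (fun d m => d.modify m [] (fun l => l ++ [p.1])) d)
    PySem.Dict.empty

def find_duos_alt (player_histories : List (String × List String)) : List String :=
  let index := pvBuildIndex player_histories
  let ids : List String :=
    (PySem.List.enumerate player_histories).foldl (fun ids p =>
      let cnt : PySem.Dict Int Int :=
        (PySem.List.dedup p.2.2).foldl (fun c m =>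
          (index.getD m []).foldl (fun c j =>
            if p.1 < j then c.modify j 0 (fun v => v + 1) else c) c)
          PySem.Dict.empty
      (PySem.List.sorted cnt.keys (fun j => j)).foldl (fun ids j =>
        if 2 ≤ cnt.getD j 0 then
          ids ++ [p.2.1, (PySem.List.pyGetD player_histories j ("", [])).1]
        else ids) ids) []
  PySem.Set.ofList ids

-- ===== PRECONDITION & SPEC =====
def Spec_find_duos (player_histories : List (String × List String)) (out : List String) : Prop := out = find_duos_alt player_histories
instance (player_histories : List (String × List String)) (out : List String) : Decidable (Spec_find_duos player_histories out) := by unfold Spec_find_duos; infer_instance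

-- ===== CLAIM (what is proved, stated in full; the proofs are below) =====
def Claim_equal_find_duos : Prop := ∀ (player_histories : List (String × List String)), Dom_find_duos player_histories → Spec_find_duos player_histories (find_duos player_histories)

-- ===== LEMMAS AND PROOFS =====

def pvItem (ph : List (String × List String)) (i : Int) : String × List String :=
  PySem.List.pyGetD ph i ("", [])

def pvInter (ph : List (String × List String)) (i j : Int) : Int :=
  PySem.Set.len (PySem.Set.inter (PySem.Set.ofList (pvItem ph i).2) (pvItem ph j).2)

def pvEm (ph : List (String × List String)) (i j : Int) : List String :=
  if 2 ≤ pvInter ph i j then [(pvItem ph i).1, (pvItem ph j).1] else []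

def pvE (ph : List (String × List String)) : List String :=
  (PySem.List.pyRange 0 ph.length 1).flatMap (fun i =>
    (PySem.List.pyRange (i + 1) ph.length 1).flatMap (fun j => pvEm ph i j))

def pvJ (ph : List (String × List String)) (i : Int) : List Int :=
  (PySem.List.dedup (pvItem ph i).2).flatMap (fun m =>
    ((pvBuildIndex ph).getD m []).filter (fun j => decide (i < j)))

lemma pvGuard {ph : List (String × List String)} {i j : Int}
    (h : 2 ≤ pvInter ph i j) : (pvItem ph i).2 ≠ [] ∧ (pvItem ph j).2 ≠ [] := by
  unfold pvInter PySem.Set.len PySem.Set.inter at h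
  constructor
  · intro h1; rw [h1] at h; simp [PySem.Set.ofList] at h
  · intro h2; rw [h2] at h; simp [PySem.Set.contains] at h


-- A folds Set.add over its emission sequence

lemma A_eq (ph : List (String × List String)) :
    find_duos ph = (pvE ph).foldl PySem.Set.add [] := by
  unfold find_duos pvE
  rw [List.foldl_flatMap]
  show _ = List.foldl _ PySem.Set.empty _
  apply PySem.List.foldl_congr_mem
  intro acc i _
  rw [List.foldl_flatMap]
  apply PySem.List.foldl_congr_mem
  intro duos j _
  show (if (pvItem ph i).2 ≠ [] ∧ (pvItem ph j).2 ≠ [] then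
          (if 2 ≤ pvInter ph i j then PySem.Set.add (PySem.Set.add duos (pvItem ph i).1) (pvItem ph j).1 else duos)
        else duos) = List.foldl PySem.Set.add duos (pvEm ph i j)
  unfold pvEm
  by_cases h2 : 2 ≤ pvInter ph i j
  · rw [if_pos (pvGuard h2), if_pos h2, if_pos h2]; rfl
  · rw [if_neg h2]
    by_cases hg : (pvItem ph i).2 ≠ [] ∧ (pvItem ph j).2 ≠ []
    · rw [if_pos hg, if_neg h2]; rfl
    · rw [if_neg hg, if_neg h2]; rfl

-- membership in enumerate

lemma mem_enum_aux {α : Type} (xs : List α) (d : α) (s : Int) (p : Int × α) :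
    p ∈ PySem.List.enumerate xs s ↔
      s ≤ p.1 ∧ p.1 < s + xs.length ∧ p.2 = PySem.List.pyGetD xs (p.1 - s) d := by
  induction xs generalizing s with
  | nil => simp [PySem.List.enumerate_nil]; omega
  | cons x xs ih =>
    rw [PySem.List.enumerate_cons]
    simp only [List.mem_cons, ih]
    constructor
    · rintro (rfl | ⟨h1, h2, h3⟩)
      · refine ⟨le_refl _, by simp, ?_⟩
        simp [PySem.List.pyGetD_of_nonneg]
      · refine ⟨by omega, by simp; omega, ?_⟩
        rw [h3, PySem.List.pyGetD_of_nonneg _ _ (by omega),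
            PySem.List.pyGetD_of_nonneg _ _ (by omega)]
        have h4 : (p.1 - s).toNat = (p.1 - (s+1)).toNat + 1 := by omega
        rw [h4]; rfl
    · rintro ⟨h1, h2, h3⟩
      by_cases hs : p.1 = s
      · left
        have hx : p.2 = x := by
          rw [h3, hs]; simp [PySem.List.pyGetD_of_nonneg]
        obtain ⟨a, b⟩ := p
        simp only at hx hs
        rw [hx, hs]
      · right
        refine ⟨by omega, by simp at h2 ⊢; omega, ?_⟩
        rw [h3, PySem.List.pyGetD_of_nonneg _ _ (by omega),
            PySem.List.pyGetD_of_nonneg _ _ (by omega)]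
        have h4 : (p.1 - s).toNat = (p.1 - (s+1)).toNat + 1 := by omega
        rw [h4]; rfl

lemma fold_modify_getD (L : List String) (d : PySem.Dict String (List Int)) (i : Int) (m : String) :
    (L.foldl (fun d m' => d.modify m' [] (fun l => l ++ [i])) d).getD m []
      = d.getD m [] ++ List.replicate (L.count m) i := by
  induction L generalizing d with
  | nil => simp
  | cons a L ih =>
    rw [List.foldl_cons, ih]
    show (d.modify a [] (fun l => l ++ [i])).getD m [] ++ _ = _
    rw [PySem.Dict.modify, PySem.Dict.getD_insert]
    by_cases hm : m = a
    · subst hm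
      rw [if_pos rfl, List.count_cons_self, List.replicate_succ]
      simp
    · rw [if_neg hm, List.count_cons_of_ne (fun h => hm h.symm)]

lemma idx_aux (xs : List (String × List String)) (s : Int) (d : PySem.Dict String (List Int)) (m : String) :
    ((PySem.List.enumerate xs s).foldl (fun d p =>
        (PySem.List.dedup p.2.2).foldl (fun d m' => d.modify m' [] (fun l => l ++ [p.1])) d) d).getD m []
      = d.getD m [] ++ ((PySem.List.enumerate xs s).filter (fun p => decide (m ∈ p.2.2))).map (fun p => p.1) := by
  induction xs generalizing s d with
  | nil => simp [PySem.List.enumerate_nil]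
  | cons x xs ih =>
    rw [PySem.List.enumerate_cons, List.foldl_cons, ih, fold_modify_getD]
    by_cases hm : m ∈ x.2
    · have hc : (PySem.List.dedup x.2).count m = 1 :=
        List.count_eq_one_of_mem (PySem.List.nodup_dedup x.2) ((PySem.List.mem_dedup x.2 m).2 hm)
      rw [hc]
      simp [hm]
    · have hc : (PySem.List.dedup x.2).count m = 0 := by
        rw [List.count_eq_zero]
        exact fun h => hm ((PySem.List.mem_dedup x.2 m).1 h)
      rw [hc]
      simp [hm]

lemma index_getD (ph : List (String × List String)) (m : String) :
    (pvBuildIndex ph).getD m [] =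
      ((PySem.List.enumerate ph).filter (fun p => decide (m ∈ p.2.2))).map (fun p => p.1) := by
  rw [pvBuildIndex, idx_aux, PySem.Dict.getD_empty, List.nil_append]

lemma mem_index_getD (ph : List (String × List String)) (m : String) (j : Int) :
    j ∈ (pvBuildIndex ph).getD m [] ↔
      0 ≤ j ∧ j < (ph.length : Int) ∧ m ∈ (pvItem ph j).2 := by
  rw [index_getD]
  simp only [List.mem_map, List.mem_filter, mem_enum_aux ph ("", []) 0]
  constructor
  · rintro ⟨p, ⟨⟨h0, h1, h2⟩, hm⟩, rfl⟩
    simp at hm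
    rw [sub_zero] at h2
    exact ⟨h0, by omega, by rw [pvItem, ← h2]; exact hm⟩
  · rintro ⟨h0, h1, hm⟩
    exact ⟨(j, pvItem ph j), ⟨⟨h0, by omega, by rw [sub_zero]; rfl⟩, by simpa [pvItem] using hm⟩, rfl⟩

lemma nodup_index_getD (ph : List (String × List String)) (m : String) :
    ((pvBuildIndex ph).getD m []).Nodup := by
  rw [index_getD]
  apply List.Nodup.sublist (List.Sublist.map _ List.filter_sublist)
  rw [PySem.List.map_fst_enumerate]
  exact PySem.List.nodup_pyRange_one _ _

lemma cnt_eq_counter (ph : List (String × List String)) (p : Int × (String × List String))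
    (hp : p ∈ PySem.List.enumerate ph 0) :
    ((PySem.List.dedup p.2.2).foldl (fun c m =>
        (((pvBuildIndex ph).getD m []).foldl (fun c j =>
          if p.1 < j then c.modify j 0 (fun v => v + 1) else c) c))
      PySem.Dict.empty) = PySem.Dict.counter (pvJ ph p.1) := by
  have h2 : p.2 = pvItem ph p.1 := by
    have := ((mem_enum_aux ph ("", []) 0 p).1 hp).2.2
    rwa [sub_zero] at this
  rw [PySem.Dict.counter_eq_foldl, pvJ, List.foldl_flatMap, ← h2]
  apply PySem.List.foldl_congr_mem
  intro c m _
  rw [List.foldl_filter]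
  apply PySem.List.foldl_congr_mem
  intro c2 j _
  simp only [decide_eq_true_eq]

lemma sum_map_ite_nat {α : Type} (p : α → Bool) (l : List α) :
    (l.map (fun x => if p x = true then (1:Nat) else 0)).sum = (l.filter p).length := by
  induction l with
  | nil => rfl
  | cons a l ih =>
    simp only [List.map_cons, List.sum_cons, ih, List.filter_cons]
    by_cases h : p a <;> simp [h]; omega

lemma count_pvJ (ph : List (String × List String)) (i j : Int)
    (h0 : 0 ≤ i) (hij : i < j) (hjn : j < (ph.length : Int)) :
    ((pvJ ph i).count j : Int) = pvInter ph i j := by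
  rw [pvJ, List.count_flatMap]
  have hmap : ∀ m ∈ PySem.List.dedup (pvItem ph i).2,
      (List.count j ∘ fun m => ((pvBuildIndex ph).getD m []).filter (fun j => decide (i < j))) m
        = if decide (m ∈ (pvItem ph j).2) = true then (1:Nat) else 0 := by
    intro m _
    show List.count j (((pvBuildIndex ph).getD m []).filter (fun j => decide (i < j))) = _
    rw [List.count_filter (by simpa using hij)]
    by_cases hm : m ∈ (pvItem ph j).2
    · rw [if_pos (by simpa using hm)]
      exact List.count_eq_one_of_mem (nodup_index_getD ph m)
        ((mem_index_getD ph m j).2 ⟨by omega, hjn, hm⟩)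
    · rw [if_neg (by simpa using hm), List.count_eq_zero]
      intro hj
      exact hm ((mem_index_getD ph m j).1 hj).2.2
  rw [List.map_congr_left hmap, sum_map_ite_nat]
  rw [pvInter, PySem.Set.len, PySem.Set.inter]
  rw [PySem.List.dedup_eq_ofList]
  congr 2
  apply List.filter_congr
  intro m _
  show decide (m ∈ (pvItem ph j).2) = PySem.Set.contains (pvItem ph j).2 m
  simp [PySem.Set.contains]

lemma one_le_pvInter_iff (ph : List (String × List String)) (i j : Int) :
    1 ≤ pvInter ph i j ↔ ∃ m ∈ (pvItem ph i).2, m ∈ (pvItem ph j).2 := by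
  rw [pvInter, PySem.Set.len, PySem.Set.inter]
  constructor
  · intro h
    have hlen : 0 < (List.filter (fun x => PySem.Set.contains (pvItem ph j).2 x) (PySem.Set.ofList (pvItem ph i).2)).length := by omega
    rw [List.length_pos_iff_exists_mem] at hlen
    obtain ⟨m, hm⟩ := hlen
    rw [List.mem_filter] at hm
    refine ⟨m, (PySem.Set.mem_ofList _ _).1 hm.1, ?_⟩
    simpa [PySem.Set.contains] using hm.2
  · rintro ⟨m, hmi, hmj⟩
    have hm : m ∈ List.filter (fun x => PySem.Set.contains (pvItem ph j).2 x) (PySem.Set.ofList (pvItem ph i).2) := by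
      rw [List.mem_filter]
      exact ⟨(PySem.Set.mem_ofList _ _).2 hmi, by simpa [PySem.Set.contains] using hmj⟩
    have := List.length_pos_of_mem hm
    omega

lemma mem_pvJ (ph : List (String × List String)) (i j : Int) :
    j ∈ pvJ ph i ↔ i < j ∧ 0 ≤ j ∧ j < (ph.length : Int) ∧ 1 ≤ pvInter ph i j := by
  rw [pvJ]
  simp only [List.mem_flatMap, List.mem_filter, mem_index_getD, PySem.List.mem_dedup,
    decide_eq_true_eq, one_le_pvInter_iff]
  constructor
  · rintro ⟨m, hmi, ⟨h0, hn, hmj⟩, hij⟩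
    exact ⟨hij, h0, hn, m, by simpa [pvItem] using hmi, hmj⟩
  · rintro ⟨hij, h0, hn, m, hmi, hmj⟩
    exact ⟨m, by simpa [pvItem] using hmi, ⟨h0, hn, hmj⟩, hij⟩

lemma sorted_keys (ph : List (String × List String)) (i : Int) (h0 : 0 ≤ i) :
    PySem.List.sorted (PySem.Dict.counter (pvJ ph i)).keys (fun j => j) =
      (PySem.List.pyRange (i + 1) ph.length 1).filter (fun j => decide (1 ≤ pvInter ph i j)) := by
  rw [PySem.Dict.keys_counter]
  apply PySem.List.sorted_eq_of_perm_of_pairwise_lt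
  · rw [List.perm_ext_iff_of_nodup
      (List.Nodup.filter _ (PySem.List.nodup_pyRange_one _ _)) (PySem.Set.nodup_ofList _)]
    intro j
    rw [List.mem_filter, PySem.Set.mem_ofList, mem_pvJ, PySem.List.mem_pyRange_one]
    simp only [decide_eq_true_eq]
    omega
  · exact List.Pairwise.filter _ (PySem.List.pairwise_lt_pyRange_one _ _)

lemma flatMap_filter_of_nil {α β : Type} (p : α → Bool) (g : α → List β) (l : List α)
    (h : ∀ x ∈ l, p x = false → g x = []) :
    (l.filter p).flatMap g = l.flatMap g := by
  induction l with
  | nil => rfl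
  | cons a l ih =>
    rw [List.filter_cons]
    by_cases ha : p a
    · rw [if_pos ha, List.flatMap_cons, List.flatMap_cons,
        ih (fun x hx => h x (List.mem_cons_of_mem a hx))]
    · rw [if_neg ha, List.flatMap_cons, h a (List.mem_cons_self) (by simpa using ha),
        List.nil_append, ih (fun x hx => h x (List.mem_cons_of_mem a hx))]

lemma B_ids (ph : List (String × List String)) :
    ((PySem.List.enumerate ph).foldl (fun ids p =>
      let cnt : PySem.Dict Int Int :=
        (PySem.List.dedup p.2.2).foldl (fun c m =>
          ((pvBuildIndex ph).getD m []).foldl (fun c j =>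
            if p.1 < j then c.modify j 0 (fun v => v + 1) else c) c)
          PySem.Dict.empty
      (PySem.List.sorted cnt.keys (fun j => j)).foldl (fun ids j =>
        if 2 ≤ cnt.getD j 0 then
          ids ++ [p.2.1, (PySem.List.pyGetD ph j ("", [])).1]
        else ids) ids) []) = pvE ph := by
  have hbody : ∀ (ids : List String), ∀ p ∈ PySem.List.enumerate ph 0,
      ((fun ids (p : Int × (String × List String)) =>
        let cnt : PySem.Dict Int Int :=
          (PySem.List.dedup p.2.2).foldl (fun c m =>
            ((pvBuildIndex ph).getD m []).foldl (fun c j =>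
              if p.1 < j then c.modify j 0 (fun v => v + 1) else c) c)
            PySem.Dict.empty
        (PySem.List.sorted cnt.keys (fun j => j)).foldl (fun ids j =>
          if 2 ≤ cnt.getD j 0 then
            ids ++ [p.2.1, (PySem.List.pyGetD ph j ("", [])).1]
          else ids) ids) ids p) =
      ids ++ (PySem.List.pyRange (p.1 + 1) ph.length 1).flatMap (fun j => pvEm ph p.1 j) := by
    intro ids p hp
    have henum := (mem_enum_aux ph ("", []) 0 p).1 hp
    rw [sub_zero] at henum
    obtain ⟨hp0, hpn, hpv⟩ := henum
    simp only [cnt_eq_counter ph p hp]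
    · rw [sorted_keys ph p.1 hp0]
      rw [PySem.List.foldl_congr_mem _ _ (fun ids j => ids ++ pvEm ph p.1 j) ids ?hcong]
      case hcong =>
        intro acc j hj
        rw [List.mem_filter, PySem.List.mem_pyRange_one] at hj
        obtain ⟨⟨hj1, hj2⟩, hj3⟩ := hj
        show (if 2 ≤ (PySem.Dict.counter (pvJ ph p.1)).getD j 0 then _ else _) = _
        rw [PySem.Dict.getD_counter, count_pvJ ph p.1 j hp0 (by omega) hj2]
        simp only [pvEm]
        by_cases h2 : 2 ≤ pvInter ph p.1 j
        · rw [if_pos h2, if_pos h2, pvItem, pvItem, ← hpv]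
        · rw [if_neg h2, if_neg h2, List.append_nil]
      rw [PySem.List.foldl_append_eq_flatMap]
      rw [flatMap_filter_of_nil _ _ _ ?hnil]
      case hnil =>
        intro j _ hfalse
        rw [decide_eq_false_iff_not] at hfalse
        simp only [pvEm]
        rw [if_neg (fun h2 => hfalse (by omega))]
  rw [PySem.List.foldl_congr_mem _ _ _ _ hbody]
  rw [PySem.List.foldl_append_eq_flatMap, List.nil_append]
  rw [← List.flatMap_map (fun (p : Int × (String × List String)) => p.1)
        (fun i => (PySem.List.pyRange (i + 1) ph.length 1).flatMap (fun j => pvEm ph i j))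
        (PySem.List.enumerate ph)]
  rw [PySem.List.map_fst_enumerate, pvE]
  norm_num

lemma B_eq (ph : List (String × List String)) :
    find_duos_alt ph = (pvE ph).foldl PySem.Set.add [] := by
  show PySem.Set.ofList ((PySem.List.enumerate ph).foldl (fun ids p =>
      let cnt : PySem.Dict Int Int :=
        (PySem.List.dedup p.2.2).foldl (fun c m =>
          ((pvBuildIndex ph).getD m []).foldl (fun c j =>
            if p.1 < j then c.modify j 0 (fun v => v + 1) else c) c)
          PySem.Dict.empty
      (PySem.List.sorted cnt.keys (fun j => j)).foldl (fun ids j =>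
        if 2 ≤ cnt.getD j 0 then
          ids ++ [p.2.1, (PySem.List.pyGetD ph j ("", [])).1]
        else ids) ids) []) = _
  rw [B_ids, PySem.Set.ofList_eq_foldl]

-- ===== VERDICT (by name: the statement is the Claim_ definition above) =====
theorem find_duos_spec : Claim_equal_find_duos := by
  intro ph _
  unfold Spec_find_duos
  rw [A_eq, B_eq]
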